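-- pv_equiv track=rewrite | github.com/AvaTar-ArTs/AVATARARTS | 00_ACTIVE/DEVELOPMENT/UTILITIES_TOOLS/scripts/root-utilities/final_duplicate_removal_report.py | consolidate_duplicates
-- ===== SOURCE A (Python) =====
-- def consolidate_duplicates(recommendations):
--     """Consolidate duplicate recommendations, preferring higher confidence"""
--     consolidated = {}
--     conflict_resolution = {
--         'content_based': 3,  # Highest priority
--         'comprehensive': 2,  # Medium priority
--         'basic': 1          # Lowest priority
--     }
--
--     for rec in recommendations:
--         file_path = rec['file_path']
--
--         if file_path not in consolidated:
--             consolidated[file_path] = rec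
--         else:
--             # Keep the recommendation with higher priority source
--             current_priority = conflict_resolution[consolidated[file_path]['analysis_source']]
--             new_priority = conflict_resolution[rec['analysis_source']]
--
--             if new_priority > current_priority:
--                 consolidated[file_path] = rec
--
--     return list(consolidated.values())
-- ===== SOURCE B (Python) =====
-- def consolidate_duplicates(recommendations):
--     """Consolidate duplicate recommendations, preferring higher confidence"""
--     conflict_resolution = {
--         'content_based': 3,  # Highest priority
--         'comprehensive': 2,  # Medium priority
--         'basic': 1          # Lowest priority
--     }
--
--     # Pass 1: group the recommendations by file_path (first-seen key order).
--     groups = {}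
--     for rec in recommendations:
--         groups.setdefault(rec['file_path'], []).append(rec)
--
--     # Pass 2: reduce each group to its highest-priority member (earliest wins ties).
--     result = []
--     for group in groups.values():
--         best = group[0]
--         for r in group[1:]:
--             if conflict_resolution[r['analysis_source']] > conflict_resolution[best['analysis_source']]:
--                 best = r
--         result.append(best)
--     return result
-- ===== Notes on version B (the rewrite author's own statement) =====
-- stated objective: alternative
-- what changed: A interleaves grouping and winner selection in one dict pass keeping a running best per file_path; B first groups all recommendations by file_path into lists, then reduces each group to its highest-priority member in a second pass.
import Mathlib
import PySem

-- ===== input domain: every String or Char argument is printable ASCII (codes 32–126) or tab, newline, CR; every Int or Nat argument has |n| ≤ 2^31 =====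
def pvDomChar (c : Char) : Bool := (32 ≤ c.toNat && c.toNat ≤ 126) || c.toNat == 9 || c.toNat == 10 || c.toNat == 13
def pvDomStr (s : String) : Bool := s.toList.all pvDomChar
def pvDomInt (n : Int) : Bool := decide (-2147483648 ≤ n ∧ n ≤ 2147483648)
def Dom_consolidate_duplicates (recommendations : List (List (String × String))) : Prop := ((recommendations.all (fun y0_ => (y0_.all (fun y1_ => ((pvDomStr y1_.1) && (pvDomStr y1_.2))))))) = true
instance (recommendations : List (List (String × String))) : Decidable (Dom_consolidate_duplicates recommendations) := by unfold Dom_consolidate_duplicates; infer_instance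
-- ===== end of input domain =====

-- B replaces A's interleaved running-max dict pass by a two-pass decomposition
-- (group by file_path, then reduce each group to its highest-priority member); objective: alternative.


-- ===== PORT A =====
def consolidate_duplicates (recommendations : List (List (String × String))) : List (List (String × String)) :=
  let conflict_resolution : PySem.Dict String Int :=
    PySem.Dict.ofList [("content_based", 3), ("comprehensive", 2), ("basic", 1)]
  let consolidated : PySem.Dict String (List (String × String)) :=
    recommendations.foldl (fun consolidated rec =>
      -- rec['file_path']: KeyError (= none) is excluded by Pre_, so .getD "" is exact there
      let file_path := ((PySem.Dict.mk rec).get? "file_path").getD ""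
      if consolidated.contains file_path = false then
        consolidated.insert file_path rec
      else
        -- conflict_resolution[...['analysis_source']]: KeyErrors excluded by Pre_, .getD exact there
        let current_priority := conflict_resolution.getD
          (((PySem.Dict.mk ((consolidated.get? file_path).getD [])).get? "analysis_source").getD "") 0
        let new_priority := conflict_resolution.getD
          (((PySem.Dict.mk rec).get? "analysis_source").getD "") 0
        if new_priority > current_priority then consolidated.insert file_path rec else consolidated)
      PySem.Dict.empty
  consolidated.values

-- ===== PORT B =====
def consolidate_duplicates_alt (recommendations : List (List (String × String))) : List (List (String × String)) :=
  let conflict_resolution : PySem.Dict String Int :=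
    PySem.Dict.ofList [("content_based", 3), ("comprehensive", 2), ("basic", 1)]
  -- pass 1: groups.setdefault(rec['file_path'], []).append(rec)
  let groups : PySem.Dict String (List (List (String × String))) :=
    recommendations.foldl (fun groups rec =>
      groups.modify (((PySem.Dict.mk rec).get? "file_path").getD "") [] (fun g => g ++ [rec]))
      PySem.Dict.empty
  -- pass 2: best = group[0]; linear scan of group[1:]
  groups.values.map (fun group =>
    match group with
    | [] => []  -- unreachable: every group built in pass 1 is nonempty
    | best :: rest =>
      rest.foldl (fun best r =>
        if conflict_resolution.getD (((PySem.Dict.mk r).get? "analysis_source").getD "") 0 >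
           conflict_resolution.getD (((PySem.Dict.mk best).get? "analysis_source").getD "") 0
        then r else best) best)

-- ===== PRECONDITION & SPEC =====
-- Pre_ excludes exactly the inputs on which Python A raises KeyError: a rec without a
-- 'file_path' key, or a rec sharing its file_path with another rec (group of size ≥ 2,
-- where A looks every member's source up) whose 'analysis_source' is missing or not one
-- of the three known sources.
def Pre_consolidate_duplicates (recommendations : List (List (String × String))) : Prop :=
  ∀ rec ∈ recommendations,
    ((PySem.Dict.mk rec).get? "file_path").isSome = true ∧
    (2 ≤ recommendations.countP
        (fun r => (PySem.Dict.mk r).get? "file_path" == (PySem.Dict.mk rec).get? "file_path") →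
      ((PySem.Dict.mk rec).get? "analysis_source" = some "content_based" ∨
       (PySem.Dict.mk rec).get? "analysis_source" = some "comprehensive" ∨
       (PySem.Dict.mk rec).get? "analysis_source" = some "basic"))
instance (recommendations : List (List (String × String))) : Decidable (Pre_consolidate_duplicates recommendations) := by
  unfold Pre_consolidate_duplicates; infer_instance

def pvWitness_consolidate_duplicates : (List (List (String × String))) :=
  [[("file_path", "a.txt"), ("analysis_source", "basic")],
   [("file_path", "b.txt"), ("analysis_source", "content_based")],
   [("file_path", "a.txt"), ("analysis_source", "comprehensive")]]

def Spec_consolidate_duplicates (recommendations : List (List (String × String))) (out : List (List (String × String))) : Prop := out = consolidate_duplicates_alt recommendations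
instance (recommendations : List (List (String × String))) (out : List (List (String × String))) : Decidable (Spec_consolidate_duplicates recommendations out) := by unfold Spec_consolidate_duplicates; infer_instance

-- ===== CLAIM (what is proved, stated in full; the proofs are below) =====
def Claim_equal_consolidate_duplicates : Prop := ∀ (recommendations : List (List (String × String))), Dom_consolidate_duplicates recommendations → Pre_consolidate_duplicates recommendations → Spec_consolidate_duplicates recommendations (consolidate_duplicates recommendations)

-- ===== LEMMAS AND PROOFS =====
-- (the equality in fact holds for ALL inputs of the Lean ports; Pre_'s role is to mark
--  where the Python raises, the proof below does not need it)

-- shared priority lookup (definitionally the expression both ports inline)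
def pvCR : PySem.Dict String Int :=
  PySem.Dict.ofList [("content_based", 3), ("comprehensive", 2), ("basic", 1)]
def pvPrio (rec : List (String × String)) : Int :=
  pvCR.getD (((PySem.Dict.mk rec).get? "analysis_source").getD "") 0
def pvFp (rec : List (String × String)) : String :=
  ((PySem.Dict.mk rec).get? "file_path").getD ""
def pvBest (best r : List (String × String)) : List (String × String) :=
  if pvPrio r > pvPrio best then r else best
def pvRed (g : List (List (String × String))) : List (String × String) :=
  match g with
  | [] => []
  | best :: rest => rest.foldl pvBest best
def pvF (p : String × List (List (String × String))) : String × List (String × String) :=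
  (p.1, pvRed p.2)
def pvStepA (d : PySem.Dict String (List (String × String))) (rec : List (String × String)) :
    PySem.Dict String (List (String × String)) :=
  if d.contains (pvFp rec) = false then d.insert (pvFp rec) rec
  else if pvPrio rec > pvPrio ((d.get? (pvFp rec)).getD []) then d.insert (pvFp rec) rec else d
def pvStepG (d : PySem.Dict String (List (List (String × String)))) (rec : List (String × String)) :
    PySem.Dict String (List (List (String × String))) :=
  d.modify (pvFp rec) [] (fun g => g ++ [rec])

lemma pv_get?_mk_map (l : List (String × List (List (String × String)))) (k : String) :
    (PySem.Dict.mk (l.map pvF)).get? k = ((PySem.Dict.mk l).get? k).map pvRed := by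
  induction l with
  | nil => rfl
  | cons p t ih =>
    cases p with
    | mk pk pv =>
      simp only [List.map_cons, pvF, PySem.Dict.get?_mk_cons]
      by_cases h : (pk == k) = true
      · simp [h]
      · simp [h, ih]

lemma pv_contains_mk_map (l : List (String × List (List (String × String)))) (k : String) :
    (PySem.Dict.mk (l.map pvF)).contains k = (PySem.Dict.mk l).contains k := by
  rw [PySem.Dict.contains_eq_isSome_get?, PySem.Dict.contains_eq_isSome_get?, pv_get?_mk_map]
  cases (PySem.Dict.mk l).get? k <;> rfl

lemma pv_red_append (g : List (List (String × String))) (rec : List (String × String)) (h : g ≠ []) :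
    pvRed (g ++ [rec]) = pvBest (pvRed g) rec := by
  cases g with
  | nil => exact absurd rfl h
  | cons b t => simp [pvRed, List.foldl_append]

lemma pv_keys_mk (l : List (String × List (List (String × String)))) :
    (PySem.Dict.mk l).keys = l.map Prod.fst := rfl

lemma pv_main (recs : List (List (String × String))) :
    ∀ l : List (String × List (List (String × String))),
      (l.map Prod.fst).Nodup → (∀ p ∈ l, p.2 ≠ []) →
      (recs.foldl pvStepA (PySem.Dict.mk (l.map pvF))).items
        = (recs.foldl pvStepG (PySem.Dict.mk l)).items.map pvF := by
  induction recs with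
  | nil => intro l _ _; rfl
  | cons rec recs ih =>
    intro l hnd hne
    simp only [List.foldl_cons]
    by_cases hc : (PySem.Dict.mk l).contains (pvFp rec) = true
    · -- existing group: A compares priorities, B appends to the group
      have hsome : ((PySem.Dict.mk l).get? (pvFp rec)).isSome := by
        rw [← PySem.Dict.contains_eq_isSome_get?]; exact hc
      obtain ⟨g, hg⟩ := Option.isSome_iff_exists.mp hsome
      have hgne : g ≠ [] := by
        have := PySem.Dict.mem_items_of_get?_eq_some _ hg
        exact hne _ this
      -- B's step rewrites the unique entry at pvFp rec
      set l' : List (String × List (List (String × String))) :=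
        l.map (fun p => if p.1 == pvFp rec then (pvFp rec, g ++ [rec]) else p) with hl'
      have hstepG : pvStepG (PySem.Dict.mk l) rec = PySem.Dict.mk l' := by
        apply PySem.Dict.ext
        simp only [pvStepG, PySem.Dict.modify, PySem.Dict.getD_of_get?_eq_some _ _ hg,
          PySem.Dict.items_insert, hc, if_pos]
        exact hl'.symm
      -- pointwise: the rewritten entry's value is g
      have hval : ∀ p ∈ l, p.1 = pvFp rec → p.2 = g := by
        intro p hp hpk
        have : (PySem.Dict.mk l).get? p.1 = some p.2 := by
          apply PySem.Dict.get?_of_mem_items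
          · exact hp
          · rw [pv_keys_mk]; exact hnd
        rw [hpk, hg] at this
        exact (Option.some_injective _ this).symm
      have hcur : ((PySem.Dict.mk (l.map pvF)).get? (pvFp rec)).getD [] = pvRed g := by
        rw [pv_get?_mk_map, hg]; rfl
      have hmapF : ∀ (v : List (String × String)), v = pvBest (pvRed g) rec →
          (l.map pvF).map (fun p => if p.1 == pvFp rec then (pvFp rec, v) else p) = l'.map pvF := by
        intro v hv
        rw [hl', List.map_map, List.map_map]
        apply List.map_congr_left
        intro p hp
        by_cases hk : p.1 = pvFp rec
        · have h2 : p.2 = g := hval p hp hk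
          simp [pvF, hk, hv, h2, pv_red_append g rec hgne]
        · simp [pvF, hk]
      have hnd' : (l'.map Prod.fst).Nodup := by
        have : l'.map Prod.fst = l.map Prod.fst := by
          rw [hl', List.map_map]
          apply List.map_congr_left
          intro p _
          by_cases hk : p.1 = pvFp rec <;> simp [hk]
        rw [this]; exact hnd
      have hne' : ∀ p ∈ l', p.2 ≠ [] := by
        intro p hp
        rw [hl'] at hp
        obtain ⟨q, hq, hqe⟩ := List.mem_map.mp hp
        by_cases hk : q.1 = pvFp rec
        · simp [hk] at hqe; rw [← hqe]; simp
        · simp [hk] at hqe; rw [← hqe]; exact hne q hq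
      have hA : pvStepA (PySem.Dict.mk (l.map pvF)) rec = PySem.Dict.mk (l'.map pvF) := by
        have hcA : (PySem.Dict.mk (l.map pvF)).contains (pvFp rec) = true := by
          rw [pv_contains_mk_map]; exact hc
        simp only [pvStepA, hcA, Bool.true_eq_false, if_false, hcur]
        by_cases hgt : pvPrio rec > pvPrio (pvRed g)
        · rw [if_pos hgt]
          apply PySem.Dict.ext
          rw [PySem.Dict.items_insert_of_contains _ _ hcA]
          exact hmapF rec (by simp [pvBest, hgt])
        · rw [if_neg hgt]
          apply PySem.Dict.ext
          show (l.map pvF) = l'.map pvF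
          rw [hl', List.map_map]
          apply List.map_congr_left
          intro p hp
          by_cases hk : p.1 = pvFp rec
          · have h2 : p.2 = g := hval p hp hk
            simp [pvF, hk, h2, pv_red_append g rec hgne, pvBest, hgt]
          · simp [pvF, hk]
      rw [hstepG, hA, ih l' hnd' hne']
    · -- fresh file_path: both sides append
      have hc' : (PySem.Dict.mk l).contains (pvFp rec) = false := by
        cases h : (PySem.Dict.mk l).contains (pvFp rec)
        · rfl
        · exact absurd h hc
      have hcA : (PySem.Dict.mk (l.map pvF)).contains (pvFp rec) = false := by
        rw [pv_contains_mk_map]; exact hc'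
      have hstepG : pvStepG (PySem.Dict.mk l) rec = PySem.Dict.mk (l ++ [(pvFp rec, [rec])]) := by
        apply PySem.Dict.ext
        simp only [pvStepG, PySem.Dict.modify, PySem.Dict.getD_of_not_contains _ _ hc',
          PySem.Dict.items_insert, hc', Bool.false_eq_true, if_false, List.nil_append]
      have hA : pvStepA (PySem.Dict.mk (l.map pvF)) rec
          = PySem.Dict.mk ((l ++ [(pvFp rec, [rec])]).map pvF) := by
        simp only [pvStepA, hcA, if_pos]
        apply PySem.Dict.ext
        rw [PySem.Dict.items_insert_of_not_contains _ _ hcA]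
        simp [pvF, pvRed]
      have hfresh : pvFp rec ∉ l.map Prod.fst := by
        intro hmem
        have : (PySem.Dict.mk l).contains (pvFp rec) = true := by
          rw [PySem.Dict.contains_iff_mem_keys, pv_keys_mk]; exact hmem
        rw [this] at hc'; exact absurd hc' (by simp)
      have hnd' : ((l ++ [(pvFp rec, [rec])]).map Prod.fst).Nodup := by
        rw [List.map_append]
        simp only [List.map_cons, List.map_nil]
        exact List.Nodup.append hnd (List.nodup_singleton _) (by
          intro a ha hb
          simp only [List.mem_singleton] at hb
          exact hfresh (hb ▸ ha))
      have hne' : ∀ p ∈ l ++ [(pvFp rec, [rec])], p.2 ≠ [] := by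
        intro p hp
        rcases List.mem_append.mp hp with h | h
        · exact hne p h
        · simp only [List.mem_singleton] at h; rw [h]; simp
      rw [hstepG, hA, ih _ hnd' hne']

-- ===== VERDICT (by name: the statement is the Claim_ definition above) =====
theorem consolidate_duplicates_spec : Claim_equal_consolidate_duplicates := by
  intro recs _ _
  show consolidate_duplicates recs = consolidate_duplicates_alt recs
  have hmain := pv_main recs [] (by simp) (by simp)
  show ((recs.foldl pvStepA PySem.Dict.empty).values : List (List (String × String)))
    = (recs.foldl pvStepG PySem.Dict.empty).values.map pvRed
  have hempty : (PySem.Dict.empty : PySem.Dict String (List (String × String)))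
      = PySem.Dict.mk (([] : List (String × List (List (String × String)))).map pvF) := rfl
  rw [hempty]
  show (recs.foldl pvStepA (PySem.Dict.mk (([] : List (String × List (List (String × String)))).map pvF))).items.map Prod.snd
    = ((recs.foldl pvStepG (PySem.Dict.mk [])).items.map Prod.snd).map pvRed
  rw [hmain, List.map_map, List.map_map]
  rfl
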